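-- pv_equiv track=rewrite | github.com/lst016/openclaw-skill-evolution | scripts/reflector.py | identify_redundant_steps
-- ===== SOURCE A (Python) =====
-- from typing import Dict, List, Any, Optional, Tuple
--
-- def identify_redundant_steps(steps: List[Dict]) -> List[int]:
--     """Identify redundant or repeated steps"""
--     redundant_indices = []
--     seen_actions = set()
--
--     for i, step in enumerate(steps):
--         action_key = f"{step.get('action', '')}:{step.get('tool', '')}:{step.get('input_summary', '')}"
--         if action_key in seen_actions:
--             redundant_indices.append(i)
--         else:
--             seen_actions.add(action_key)
--
--     return redundant_indices
-- ===== SOURCE B (Python) =====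
-- def identify_redundant_steps(steps):
--     """Identify redundant or repeated steps (group-by-key, then take all but the first of each group)"""
--     groups = {}
--     for i, step in enumerate(steps):
--         action_key = f"{step.get('action', '')}:{step.get('tool', '')}:{step.get('input_summary', '')}"
--         groups.setdefault(action_key, []).append(i)
--     redundant = []
--     for indices in groups.values():
--         redundant.extend(indices[1:])
--     return sorted(redundant)
-- ===== Notes on version B (the rewrite author's own statement) =====
-- stated objective: alternative
-- what changed: Replaces the online seen-set membership test with a group-by pass: a dict maps each action key to all its indices, then every index except the first of each group is collected and sorted.
import Mathlib
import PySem

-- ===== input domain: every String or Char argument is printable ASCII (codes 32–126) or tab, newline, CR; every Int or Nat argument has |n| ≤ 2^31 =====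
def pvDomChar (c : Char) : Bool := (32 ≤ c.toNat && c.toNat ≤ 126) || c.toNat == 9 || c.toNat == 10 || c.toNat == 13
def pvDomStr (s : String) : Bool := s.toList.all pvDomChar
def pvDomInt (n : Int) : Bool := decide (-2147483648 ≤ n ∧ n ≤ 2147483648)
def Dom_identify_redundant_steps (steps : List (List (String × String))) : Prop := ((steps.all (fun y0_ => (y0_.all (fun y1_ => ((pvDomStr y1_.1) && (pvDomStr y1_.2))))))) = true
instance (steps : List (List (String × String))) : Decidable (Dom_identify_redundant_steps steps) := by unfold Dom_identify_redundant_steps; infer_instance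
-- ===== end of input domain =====

-- B replaces A's online seen-set test by a group-by pass (dict key → all indices, keep each group's
-- indices[1:], sort); equivalence of the RETURN values is proved below.

-- the f-string key f"{step.get('action','')}:{step.get('tool','')}:{step.get('input_summary','')}" (shared by both Pythons verbatim)
def stepKey (step : List (String × String)) : String :=
  (PySem.Dict.mk step).getD "action" "" ++ ":" ++ (PySem.Dict.mk step).getD "tool" "" ++ ":" ++
    (PySem.Dict.mk step).getD "input_summary" ""

-- ===== PORT A =====
def identify_redundant_steps (steps : List (List (String × String))) : List Int :=
  let r := (PySem.List.enumerate steps).foldl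
    (fun (st : List Int × PySem.Set String) p =>
      let action_key := stepKey p.2
      if PySem.Set.contains st.2 action_key then (st.1 ++ [p.1], st.2)
      else (st.1, PySem.Set.add st.2 action_key))
    ([], PySem.Set.empty)
  r.1

-- ===== PORT B =====
def identify_redundant_steps_alt (steps : List (List (String × String))) : List Int :=
  -- groups.setdefault(action_key, []).append(i)  ==  groups[action_key] = groups.get(action_key, []) + [i]
  let groups : PySem.Dict String (List Int) :=
    (PySem.List.enumerate steps).foldl
      (fun d p =>
        let action_key := stepKey p.2
        d.modify action_key [] (fun v => v ++ [p.1]))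
      PySem.Dict.empty
  let redundant :=
    groups.values.foldl (fun acc indices => acc ++ PySem.List.slice indices (some 1) none) []
  PySem.List.sorted redundant (fun x => x) false

-- ===== PRECONDITION & SPEC =====
def Spec_identify_redundant_steps (steps : List (List (String × String))) (out : List Int) : Prop := out = identify_redundant_steps_alt steps
instance (steps : List (List (String × String))) (out : List Int) : Decidable (Spec_identify_redundant_steps steps out) := by unfold Spec_identify_redundant_steps; infer_instance

-- ===== CLAIM (what is proved, stated in full; the proofs are below) =====
def Claim_equal_identify_redundant_steps : Prop := ∀ (steps : List (List (String × String))), Dom_identify_redundant_steps steps → Spec_identify_redundant_steps steps (identify_redundant_steps steps)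

-- ===== LEMMAS AND PROOFS =====

-- indices (from start s) of the occurrences of key c in the key list ks
def occK (c : String) (ks : List String) (s : Int) : List Int :=
  ((PySem.List.enumerate ks s).filter (fun p => p.2 == c)).map (fun p => p.1)

-- specification of A's loop on the key list: indices whose key was already seen
def adup : List String → Int → PySem.Set String → List Int
  | [], _, _ => []
  | k :: ks, s, seen =>
    if PySem.Set.contains seen k then s :: adup ks (s + 1) seen
    else adup ks (s + 1) (PySem.Set.add seen k)

lemma occK_nil (c : String) (s : Int) : occK c [] s = [] := rfl

lemma occK_cons (c k : String) (ks : List String) (s : Int) :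
    occK c (k :: ks) s = if k = c then s :: occK c ks (s + 1) else occK c ks (s + 1) := by
  simp only [occK, PySem.List.enumerate_cons, List.filter_cons]
  split_ifs with h <;> simp_all

lemma flatMap_congr_mem {α β : Type} {l : List α} {f g : α → List β}
    (h : ∀ x ∈ l, f x = g x) : l.flatMap f = l.flatMap g := by
  induction l with
  | nil => rfl
  | cons x xs ih =>
    simp only [List.flatMap_cons, h x (by simp), ih (fun y hy => h y (by simp [hy]))]

lemma adup_lb (ks : List String) (s : Int) (S : PySem.Set String) :
    ∀ x ∈ adup ks s S, s ≤ x := by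
  induction ks generalizing s S with
  | nil => simp [adup]
  | cons k ks ih =>
    intro x hx
    simp only [adup] at hx
    split_ifs at hx with h
    · rcases List.mem_cons.mp hx with h1 | h1
      · omega
      · have := ih (s + 1) S x h1; omega
    · have := ih (s + 1) (PySem.Set.add S k) x hx; omega

lemma adup_pairwise (ks : List String) (s : Int) (S : PySem.Set String) :
    (adup ks s S).Pairwise (· < ·) := by
  induction ks generalizing s S with
  | nil => simp [adup]
  | cons k ks ih =>
    simp only [adup]
    split_ifs with h
    · exact List.pairwise_cons.mpr ⟨fun x hx => by have := adup_lb ks (s + 1) S x hx; omega,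
        ih (s + 1) S⟩
    · exact ih (s + 1) (PySem.Set.add S k)

-- the central permutation: A's online duplicate list is, up to order, the concatenation of
-- "all occurrences of already-seen keys" and "all-but-first occurrences of fresh keys"
lemma adup_perm (ks : List String) (s : Int) (S K : List String)
    (hS : S.Nodup) (hK : K.Nodup)
    (hmem : ∀ c, c ∈ K ↔ (c ∈ ks ∧ c ∉ S)) :
    (adup ks s S).Perm
      (S.flatMap (fun c => occK c ks s) ++ K.flatMap (fun c => (occK c ks s).tail)) := by
  induction ks generalizing s S K with
  | nil =>
    have hKnil : K = [] := by
      cases K with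
      | nil => rfl
      | cons a t => exact absurd ((hmem a).mp (List.mem_cons_self)).1 (by simp)
    subst hKnil
    simp [adup, occK_nil]
  | cons k ks ih =>
    by_cases hk : k ∈ S
    · -- key already seen: A records index s; the group of k contributes it via occK
      have hc : PySem.Set.contains S k = true := by simpa using hk
      rw [adup]
      rw [if_pos hc]
      have hKg : K.flatMap (fun c => (occK c (k :: ks) s).tail)
          = K.flatMap (fun c => (occK c ks (s + 1)).tail) := by
        apply flatMap_congr_mem
        intro c hcK
        have hne : k ≠ c := fun h => ((hmem c).mp hcK).2 (h ▸ hk)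
        rw [occK_cons, if_neg hne]
      have hmem' : ∀ c, c ∈ K ↔ (c ∈ ks ∧ c ∉ S) := by
        intro c
        rw [hmem c]
        constructor
        · rintro ⟨h1, h2⟩
          rcases List.mem_cons.mp h1 with h | h
          · exact absurd (h ▸ hk) h2
          · exact ⟨h, h2⟩
        · rintro ⟨h1, h2⟩
          exact ⟨List.mem_cons_of_mem _ h1, h2⟩
      obtain ⟨S1, S2, rfl⟩ := List.append_of_mem hk
      have hnd := hS
      rw [List.nodup_append] at hnd
      have hkS1 : k ∉ S1 := fun h => (hnd.2.2 k h k List.mem_cons_self rfl)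
      have hkS2 : k ∉ S2 := (List.nodup_cons.mp hnd.2.1).1
      have hS1 : S1.flatMap (fun c => occK c (k :: ks) s)
          = S1.flatMap (fun c => occK c ks (s + 1)) := by
        apply flatMap_congr_mem
        intro c hcS
        have hne : k ≠ c := fun h => hkS1 (h ▸ hcS)
        rw [occK_cons, if_neg hne]
      have hS2 : S2.flatMap (fun c => occK c (k :: ks) s)
          = S2.flatMap (fun c => occK c ks (s + 1)) := by
        apply flatMap_congr_mem
        intro c hcS
        have hne : k ≠ c := fun h => hkS2 (h ▸ hcS)
        rw [occK_cons, if_neg hne]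
      have ihp := ih (s + 1) (S1 ++ k :: S2) K hS hK hmem'
      rw [List.flatMap_append, List.flatMap_cons, hS1, hS2, hKg, occK_cons, if_pos rfl]
      rw [List.flatMap_append, List.flatMap_cons] at ihp
      simp only [List.append_assoc, List.cons_append] at ihp ⊢
      exact (ihp.cons s).trans (List.perm_middle).symm
    · -- fresh key: A adds it to the set; B's group of k drops this first occurrence
      have hc : PySem.Set.contains S k = false := by simpa using hk
      have hkK : k ∈ K := (hmem k).mpr ⟨List.mem_cons_self, hk⟩
      rw [adup]
      rw [if_neg (by simpa using hk)]
      have hadd : PySem.Set.add S k = S ++ [k] := by simp [PySem.Set.add, hk]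
      obtain ⟨K1, K2, rfl⟩ := List.append_of_mem hkK
      have hnd := hK
      rw [List.nodup_append] at hnd
      have hkK1 : k ∉ K1 := fun h => (hnd.2.2 k h k List.mem_cons_self rfl)
      have hkK2 : k ∉ K2 := (List.nodup_cons.mp hnd.2.1).1
      have hSnd : (S ++ [k]).Nodup := by
        simp only [List.nodup_append, List.nodup_singleton, true_and]
        refine ⟨hS, fun a ha => ?_⟩
        simp only [List.mem_singleton, forall_eq]
        exact fun h => hk (h ▸ ha)
      have hKnd : (K1 ++ K2).Nodup := by
        have : (K1 ++ K2).Sublist (K1 ++ k :: K2) :=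
          (List.Sublist.refl K1).append (List.sublist_cons_self k K2)
        exact hK.sublist this
      have hmem' : ∀ c, c ∈ K1 ++ K2 ↔ (c ∈ ks ∧ c ∉ S ++ [k]) := by
        intro c
        constructor
        · intro hcK
          have hcne : c ≠ k := by
            rcases List.mem_append.mp hcK with h | h
            · exact fun he => hkK1 (he ▸ h)
            · exact fun he => hkK2 (he ▸ h)
          have hcK' : c ∈ K1 ++ k :: K2 := by
            rcases List.mem_append.mp hcK with h | h
            · exact List.mem_append_left _ h
            · exact List.mem_append_right _ (List.mem_cons_of_mem _ h)
          obtain ⟨h1, h2⟩ := (hmem c).mp hcK'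
          refine ⟨?_, ?_⟩
          · rcases List.mem_cons.mp h1 with h | h
            · exact absurd h hcne
            · exact h
          · simp [hcne, h2]
        · rintro ⟨h1, h2⟩
          simp only [List.mem_append, List.mem_singleton, not_or] at h2
          have : c ∈ K1 ++ k :: K2 :=
            (hmem c).mpr ⟨List.mem_cons_of_mem _ h1, h2.1⟩
          rcases List.mem_append.mp this with h | h
          · exact List.mem_append_left _ h
          · rcases List.mem_cons.mp h with h | h
            · exact absurd h h2.2
            · exact List.mem_append_right _ h
      have hSf : S.flatMap (fun c => occK c (k :: ks) s)
          = S.flatMap (fun c => occK c ks (s + 1)) := by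
        apply flatMap_congr_mem
        intro c hcS
        have hne : k ≠ c := fun h => hk (h ▸ hcS)
        rw [occK_cons, if_neg hne]
      have hK1 : K1.flatMap (fun c => (occK c (k :: ks) s).tail)
          = K1.flatMap (fun c => (occK c ks (s + 1)).tail) := by
        apply flatMap_congr_mem
        intro c hcK
        have hne : k ≠ c := fun h => hkK1 (h ▸ hcK)
        rw [occK_cons, if_neg hne]
      have hK2 : K2.flatMap (fun c => (occK c (k :: ks) s).tail)
          = K2.flatMap (fun c => (occK c ks (s + 1)).tail) := by
        apply flatMap_congr_mem
        intro c hcK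
        have hne : k ≠ c := fun h => hkK2 (h ▸ hcK)
        rw [occK_cons, if_neg hne]
      have ihp := ih (s + 1) (S ++ [k]) (K1 ++ K2) hSnd hKnd hmem'
      rw [hadd]
      rw [List.flatMap_append, List.flatMap_cons, hSf, hK1, hK2, occK_cons, if_pos rfl,
        List.tail_cons]
      rw [List.flatMap_append, List.flatMap_cons, List.flatMap_nil, List.append_nil,
        List.flatMap_append] at ihp
      simp only [List.append_assoc] at ihp ⊢
      refine ihp.trans (List.Perm.append_left _ ?_)
      exact List.perm_append_comm_assoc _ _ _

lemma adup_perm_final (ks : List String) :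
    (adup ks 0 PySem.Set.empty).Perm
      ((PySem.Set.ofList ks).flatMap (fun c => (occK c ks 0).tail)) := by
  have h := adup_perm ks 0 [] (PySem.Set.ofList ks) (by simp) (PySem.Set.nodup_ofList ks)
    (fun c => by simp [PySem.Set.mem_ofList])
  simpa using h

-- enumerate commutes with map on the payload
lemma enumerate_map {α β : Type} (f : α → β) (xs : List α) (s : Int) :
    PySem.List.enumerate (xs.map f) s = (PySem.List.enumerate xs s).map (fun p => (p.1, f p.2)) := by
  induction xs generalizing s with
  | nil => rfl
  | cons x xs ih => simp [PySem.List.enumerate_cons, ih]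

-- A's loop, generalized over start index, accumulator and seen set
lemma A_fold (steps : List (List (String × String))) (s : Int) (acc : List Int)
    (seen : PySem.Set String) :
    ((PySem.List.enumerate steps s).foldl
      (fun (st : List Int × PySem.Set String) p =>
        if PySem.Set.contains st.2 (stepKey p.2) then (st.1 ++ [p.1], st.2)
        else (st.1, PySem.Set.add st.2 (stepKey p.2)))
      (acc, seen)).1 = acc ++ adup (steps.map stepKey) s seen := by
  induction steps generalizing s acc seen with
  | nil => simp [PySem.List.enumerate_nil, adup]
  | cons st steps ih =>
    simp only [PySem.List.enumerate_cons, List.foldl_cons, List.map_cons, adup]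
    split_ifs with h
    · rw [ih (s + 1) (acc ++ [s]) seen]; simp
    · rw [ih]

-- A's port computes adup on the key list
lemma A_eq (steps : List (List (String × String))) :
    identify_redundant_steps steps = adup (steps.map stepKey) 0 PySem.Set.empty := by
  show (_ : List Int × PySem.Set String).1 = _
  rw [A_fold steps 0 [] PySem.Set.empty]
  rfl

-- each group of B's dict is exactly the occurrence-index list of its key
lemma getD_eq_occK (steps : List (List (String × String))) (c : String) :
    ((((PySem.List.enumerate steps).map (fun p => (stepKey p.2, p.1))).filter
        (fun q => q.1 == c)).map (fun q => q.2))
      = occK c (steps.map stepKey) 0 := by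
  simp [occK, enumerate_map, List.filter_map, List.map_map, Function.comp_def]

-- B's port computes sorted(group-by tails)
lemma B_eq (steps : List (List (String × String))) :
    identify_redundant_steps_alt steps =
      PySem.List.sorted
        ((PySem.Set.ofList (steps.map stepKey)).flatMap
          (fun c => (occK c (steps.map stepKey) 0).tail))
        (fun x => x) false := by
  simp only [identify_redundant_steps_alt]
  have hfold :
      (PySem.List.enumerate steps).foldl
        (fun (d : PySem.Dict String (List Int)) p => d.modify (stepKey p.2) [] (fun v => v ++ [p.1]))
        PySem.Dict.empty
      = ((PySem.List.enumerate steps).map (fun p => (stepKey p.2, p.1))).foldl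
        (fun d q => d.modify q.1 [] (fun v => v ++ [q.2])) PySem.Dict.empty := by
    rw [List.foldl_map]
  rw [hfold]
  set pairs := (PySem.List.enumerate steps).map (fun p => (stepKey p.2, p.1)) with hpairs
  set groups := pairs.foldl (fun (d : PySem.Dict String (List Int)) q =>
    d.modify q.1 [] (fun v => v ++ [q.2])) PySem.Dict.empty with hgroups
  have hnodup : groups.keys.Nodup := by
    rw [hgroups]
    exact PySem.Dict.nodup_keys_foldl_modify_key pairs Prod.fst []
      (fun _ q v => v ++ [q.2]) PySem.Dict.empty (by simp)
  have hkeys : groups.keys = PySem.Set.ofList (steps.map stepKey) := by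
    rw [hgroups]
    rw [PySem.Dict.keys_foldl_modify_key pairs Prod.fst []
      (fun _ q v => v ++ [q.2]) PySem.Dict.empty]
    have hsnd : (PySem.List.enumerate steps (0 : Int)).map (fun p => p.2) = steps :=
      PySem.List.map_snd_enumerate steps (0 : Int)
    have : pairs.map Prod.fst = steps.map stepKey := by
      rw [hpairs, List.map_map]
      conv_rhs => rw [← hsnd, List.map_map]
      rfl
    rw [this]
    rfl
  have hvals : groups.values = groups.keys.map (fun k => groups.getD k []) :=
    PySem.Dict.values_eq_map_keys groups hnodup []
  have hgetD : ∀ c, groups.getD c [] = occK c (steps.map stepKey) 0 := by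
    intro c
    rw [hgroups, PySem.Dict.getD_foldl_modify_append pairs PySem.Dict.empty c]
    simp only [PySem.Dict.getD_empty, List.nil_append]
    exact getD_eq_occK steps c
  rw [PySem.List.foldl_append_eq_flatMap, hvals, hkeys, List.nil_append]
  congr 1
  rw [List.flatMap_map]
  apply flatMap_congr_mem
  intro c _
  rw [hgetD c, PySem.List.slice_from_one]

-- ===== VERDICT (by name: the statement is the Claim_ definition above) =====
theorem identify_redundant_steps_spec : Claim_equal_identify_redundant_steps := by
  intro steps _
  show identify_redundant_steps steps = identify_redundant_steps_alt steps
  rw [A_eq, B_eq]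
  exact (PySem.List.sorted_eq_of_perm_of_pairwise_lt _ _ (fun x => x)
    (adup_perm_final (steps.map stepKey))
    (adup_pairwise (steps.map stepKey) 0 PySem.Set.empty)).symm
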